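-- pv_equiv track=rewrite | github.com/djpillen/bentley_code | mapping/aspace_agent_mapping/donors.py | extract_agents
-- ===== SOURCE A (Python) =====
-- def extract_agents(donor_data):
--     corporations = []
--     people = []
--     for donor in donor_data:
--         if donor["last name"] and donor["organization"]:
--             corporations.append(donor)
--             people.append(donor)
--         elif donor["last name"]:
--             people.append(donor)
--         elif donor["organization"]:
--             corporations.append(donor)
--
--     return people, corporations
-- ===== SOURCE B (Python) =====
-- def extract_agents(donor_data):
--     people = [donor for donor in donor_data if donor["last name"]]
--     corporations = [donor for donor in donor_data if donor["organization"]]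
--     return people, corporations
-- ===== Notes on version B (the rewrite author's own statement) =====
-- stated objective: simpler
-- what changed: Replaces A's single interleaved if/elif accumulator loop with two independent filter passes, one per output list, exploiting that the two lists are selected by independent conditions.
import Mathlib
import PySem

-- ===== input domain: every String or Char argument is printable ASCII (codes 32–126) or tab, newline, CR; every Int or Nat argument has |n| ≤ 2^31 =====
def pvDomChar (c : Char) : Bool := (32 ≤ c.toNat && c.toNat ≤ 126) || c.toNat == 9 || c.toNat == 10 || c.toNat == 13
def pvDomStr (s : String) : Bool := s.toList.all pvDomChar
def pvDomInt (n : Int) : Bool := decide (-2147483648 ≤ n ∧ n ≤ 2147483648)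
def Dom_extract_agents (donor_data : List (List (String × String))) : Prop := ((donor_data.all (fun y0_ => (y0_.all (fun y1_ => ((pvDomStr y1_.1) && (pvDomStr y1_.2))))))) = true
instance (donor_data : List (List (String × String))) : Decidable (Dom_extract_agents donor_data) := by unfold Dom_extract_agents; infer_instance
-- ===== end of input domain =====

-- B splits donors into the two lists by two independent filter passes instead of A's single if/elif loop; same return value on Pre_.

-- ===== PORT A =====
-- donor["k"]: first-match association-list lookup; under Pre_ the key is present, so getD "" never fires
def pyKey (donor : List (String × String)) (k : String) : String := (List.lookup k donor).getD ""

def extract_agents (donor_data : List (List (String × String))) : (List (List (String × String))) × (List (List (String × String))) :=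
  let st := donor_data.foldl (fun (st : List (List (String × String)) × List (List (String × String))) donor =>
    if pyKey donor "last name" ≠ "" ∧ pyKey donor "organization" ≠ "" then
      (st.1 ++ [donor], st.2 ++ [donor])
    else if pyKey donor "last name" ≠ "" then
      (st.1, st.2 ++ [donor])
    else if pyKey donor "organization" ≠ "" then
      (st.1 ++ [donor], st.2)
    else st) ([], [])
  (st.2, st.1)

-- ===== PORT B =====
def extract_agents_alt (donor_data : List (List (String × String))) : (List (List (String × String))) × (List (List (String × String))) :=
  (donor_data.filter (fun d => pyKey d "last name" ≠ ""),
   donor_data.filter (fun d => pyKey d "organization" ≠ ""))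

-- ===== PRECONDITION & SPEC =====
-- A (and B) raise KeyError when a donor lacks "last name" or "organization"; Pre_ admits exactly the inputs where A returns.
def Pre_extract_agents (donor_data : List (List (String × String))) : Prop :=
  ∀ d ∈ donor_data, (List.lookup "last name" d).isSome ∧ (List.lookup "organization" d).isSome
instance (donor_data : List (List (String × String))) : Decidable (Pre_extract_agents donor_data) := by unfold Pre_extract_agents; infer_instance

def pvWitness_extract_agents : (List (List (String × String))) :=
  [[("last name", "Smith"), ("organization", "")], [("last name", ""), ("organization", "Acme")]]

def Spec_extract_agents (donor_data : List (List (String × String))) (out : (List (List (String × String))) × (List (List (String × String)))) : Prop := out = extract_agents_alt donor_data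
instance (donor_data : List (List (String × String))) (out : (List (List (String × String))) × (List (List (String × String)))) : Decidable (Spec_extract_agents donor_data out) := by unfold Spec_extract_agents; infer_instance

-- ===== CLAIM (what is proved, stated in full; the proofs are below) =====
def Claim_equal_extract_agents : Prop := ∀ (donor_data : List (List (String × String))), Dom_extract_agents donor_data → Pre_extract_agents donor_data → Spec_extract_agents donor_data (extract_agents donor_data)

-- ===== LEMMAS AND PROOFS =====
theorem extract_agents_loop (xs : List (List (String × String)))
    (c p : List (List (String × String))) :
    xs.foldl (fun (st : List (List (String × String)) × List (List (String × String))) donor =>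
      if pyKey donor "last name" ≠ "" ∧ pyKey donor "organization" ≠ "" then
        (st.1 ++ [donor], st.2 ++ [donor])
      else if pyKey donor "last name" ≠ "" then
        (st.1, st.2 ++ [donor])
      else if pyKey donor "organization" ≠ "" then
        (st.1 ++ [donor], st.2)
      else st) (c, p)
    = (c ++ xs.filter (fun d => pyKey d "organization" ≠ ""),
       p ++ xs.filter (fun d => pyKey d "last name" ≠ "")) := by
  induction xs generalizing c p with
  | nil => simp
  | cons d xs ih =>
    simp only [List.foldl_cons]
    split_ifs with h1 h2 h3 <;> rw [ih] <;>
      simp_all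

-- ===== VERDICT (by name: the statement is the Claim_ definition above) =====
theorem extract_agents_spec : Claim_equal_extract_agents := by
  intro donor_data _ _
  unfold Spec_extract_agents extract_agents extract_agents_alt
  rw [extract_agents_loop]
  simp
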